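-- pv_equiv track=rewrite | github.com/fccc100/Leetcode | 2001-2500/2048-下一个更大的数值平衡数/python-2048/Solution.py | check
-- ===== SOURCE A (Python) =====
-- def check(n):
--     map = [0] * 10
--     while n > 0:
--         k = n % 10
--         map[k] += 1
--         n //= 10
--     for i in range(10):
--         if 0 < map[i] != i:
--             return False
--     return True
-- ===== SOURCE B (Python) =====
-- def check(n):
--     def digits(m):
--         return [] if m <= 0 else [m % 10] + digits(m // 10)
--     ds = digits(n)
--     return all(ds.count(d) == d for d in ds)
-- ===== Notes on version B (the rewrite author's own statement) =====
-- stated objective: simpler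
-- what changed: B builds the list of decimal digits by recursion and checks each occurring digit's count against its value directly, instead of A's in-place length-10 frequency table plus a second early-return pass over range(10).
import Mathlib
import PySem

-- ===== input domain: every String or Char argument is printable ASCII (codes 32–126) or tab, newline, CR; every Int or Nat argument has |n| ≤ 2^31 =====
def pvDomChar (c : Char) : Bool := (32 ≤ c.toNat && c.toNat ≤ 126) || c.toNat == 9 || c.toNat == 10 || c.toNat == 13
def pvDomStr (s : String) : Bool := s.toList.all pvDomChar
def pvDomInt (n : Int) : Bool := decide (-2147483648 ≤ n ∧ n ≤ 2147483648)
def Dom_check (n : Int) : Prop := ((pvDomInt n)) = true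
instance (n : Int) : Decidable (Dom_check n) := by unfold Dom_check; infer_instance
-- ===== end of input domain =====

-- B replaces A's in-place frequency table and second range(10) pass by a recursive
-- digit list checked directly against per-digit counts (objective: simpler).

-- ===== PORT A =====
-- the 'while n > 0' loop updating the length-10 frequency table 'map';
-- the Nat argument is fuel making the recursion structural (n.toNat steps always suffice)
def checkLoop : Nat → Int → List Int → List Int
  | 0, _, m => m
  | f + 1, n, m =>
    if 0 < n then
      checkLoop f (PySem.Int.floordiv n 10)
        (m.set (PySem.Int.mod n 10).toNat (m.getD (PySem.Int.mod n 10).toNat 0 + 1))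
    else m

def check (n : Int) : Bool :=
  let m := checkLoop n.toNat n (List.replicate 10 0)
  -- 'for i in range(10): if 0 < map[i] != i: return False' then 'return True'
  (List.range 10).all (fun i => !(decide (0 < m.getD i 0) && decide (m.getD i 0 ≠ (i : Int))))

-- ===== PORT B =====
-- 'digits(m)': recursive digit-list construction, with the same structural fuel guard
def pyDigits : Nat → Int → List Int
  | 0, _ => []
  | f + 1, m =>
    if 0 < m then PySem.Int.mod m 10 :: pyDigits f (PySem.Int.floordiv m 10) else []

def check_alt (n : Int) : Bool :=
  let ds := pyDigits n.toNat n
  ds.all (fun d => decide ((ds.count d : Int) = d))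

-- ===== PRECONDITION & SPEC =====
def Spec_check (n : Int) (out : Bool) : Prop := out = check_alt n
instance (n : Int) (out : Bool) : Decidable (Spec_check n out) := by unfold Spec_check; infer_instance

-- ===== CLAIM (what is proved, stated in full; the proofs are below) =====
def Claim_equal_check : Prop := ∀ (n : Int), Dom_check n → Spec_check n (check n)

-- ===== LEMMAS AND PROOFS =====

theorem pymod10_eq (n : Int) : PySem.Int.mod n 10 = n % 10 := by
  show Int.fmod n 10 = n % 10
  rw [Int.fmod_eq_emod]; norm_num

theorem pydiv10_eq (n : Int) : PySem.Int.floordiv n 10 = n / 10 := by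
  show Int.fdiv n 10 = n / 10
  rw [Int.fdiv_eq_ediv]; norm_num

theorem mem_pyDigits : ∀ (f : Nat) (n d : Int), d ∈ pyDigits f n → 0 ≤ d ∧ d < 10 := by
  intro f
  induction f with
  | zero => intro n d h; simp [pyDigits] at h
  | succ f ih =>
    intro n d h
    by_cases hn : 0 < n
    · rw [pyDigits, if_pos hn] at h
      rcases List.mem_cons.mp h with h | h
      · subst h
        rw [pymod10_eq]; omega
      · exact ih _ _ h
    · rw [pyDigits, if_neg hn] at h
      simp at h

theorem checkLoop_getD : ∀ (f : Nat) (n : Int) (m : List Int) (i : Nat),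
    n.toNat ≤ f → m.length = 10 → i < 10 →
    (checkLoop f n m).getD i 0 = m.getD i 0 + ((pyDigits f n).count (i : Int) : Int) := by
  intro f
  induction f with
  | zero => intro n m i _ _ _; simp [checkLoop, pyDigits]
  | succ f ih =>
    intro n m i hf hlen hi
    by_cases hn : 0 < n
    · have hme := pymod10_eq n
      have hmod : 0 ≤ PySem.Int.mod n 10 ∧ PySem.Int.mod n 10 < 10 := by
        rw [hme]; omega
      set k := (PySem.Int.mod n 10).toNat with hk
      have hk10 : k < 10 := by omega
      rw [checkLoop, if_pos hn, pyDigits, if_pos hn]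
      have hfuel : (PySem.Int.floordiv n 10).toNat ≤ f := by
        rw [pydiv10_eq]; omega
      have hlen' : (m.set k (m.getD k 0 + 1)).length = 10 := by simpa using hlen
      rw [ih _ _ _ hfuel hlen' hi]
      have hgd : ∀ (j : Nat) (v : Int), j < 10 →
          (m.set k v).getD j 0 = if k = j then v else m.getD j 0 := by
        intro j v hj
        simp only [List.getD, List.getElem?_set]
        by_cases h : k = j
        · simp [h, show j < m.length by omega]
        · simp [h]
      rw [hgd i _ hi, List.count_cons]
      by_cases hik : k = i
      · have h2 : PySem.Int.mod n 10 = (i : Int) := by omega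
        rw [if_pos hik]
        simp only [h2, BEq.rfl, if_pos]
        rw [hik]
        push_cast
        ring
      · have h2 : ¬ n % 10 = (i : Int) := by rw [← hme]; omega
        rw [if_neg hik]
        simp [h2]
    · rw [checkLoop, if_neg hn, pyDigits, if_neg hn]
      simp

theorem count_pyDigits (n : Int) (i : Nat) (hi : i < 10) :
    (checkLoop n.toNat n (List.replicate 10 0)).getD i 0
      = ((pyDigits n.toNat n).count (i : Int) : Int) := by
  rw [checkLoop_getD n.toNat n _ i le_rfl (by simp) hi]
  have : (List.replicate 10 (0 : Int)).getD i 0 = 0 := by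
    simp only [List.getD, List.getElem?_replicate, if_pos hi, Option.getD_some]
  rw [this, zero_add]

-- ===== VERDICT (by name: the statement is the Claim_ definition above) =====
theorem check_spec : Claim_equal_check := by
  intro n _
  unfold Spec_check
  rw [Bool.eq_iff_iff]
  unfold check check_alt
  simp only [List.all_eq_true, List.mem_range, Bool.not_eq_eq_eq_not, Bool.not_true,
    Bool.and_eq_false_iff, decide_eq_false_iff_not, not_lt, ne_eq, not_not,
    decide_eq_true_eq]
  constructor
  · intro hA d hd
    obtain ⟨hd0, hd10⟩ := mem_pyDigits n.toNat n d hd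
    have hi : d.toNat < 10 := by omega
    have hcast : ((d.toNat : Int)) = d := by omega
    have hpos : 0 < (pyDigits n.toNat n).count d := List.count_pos_iff.mpr hd
    rcases hA d.toNat hi with h | h
    · rw [count_pyDigits n d.toNat hi, hcast] at h
      omega
    · rw [count_pyDigits n d.toNat hi, hcast] at h
      exact h
  · intro hB i hi
    rw [count_pyDigits n i hi]
    by_cases hz : (pyDigits n.toNat n).count (i : Int) = 0
    · left; omega
    · right
      have hmem : (i : Int) ∈ pyDigits n.toNat n :=
        List.count_pos_iff.mp (Nat.pos_of_ne_zero hz)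
      exact hB _ hmem
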